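-- pv_equiv track=rewrite | github.com/vargadavid304/legal_citations | src/Cista_posledna_verzia.py | find_max_position
-- ===== SOURCE A (Python) =====
-- def find_max_position(arr):
--     if not arr:
--         return None
--
--     max_index = 0
--     bolo = False
--     for i in range(1, len(arr)):
--         if arr[i] > arr[i-1]:
--             max_index = i
--             bolo = True
--     if bolo is False and arr[max_index] == 0:
--         return None
--
--     return max_index
-- ===== SOURCE B (Python) =====
-- def find_max_position(arr):
--     if not arr:
--         return None
--     for i in range(len(arr) - 1, 0, -1):
--         if arr[i] > arr[i - 1]:
--             return i
--     return None if arr[0] == 0 else 0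
-- ===== Notes on version B (the rewrite author's own statement) =====
-- stated objective: alternative
-- what changed: Replaces A's full forward fold that tracks a last-hit index and a found flag with a stateless backward scan that returns the first qualifying index from the end immediately, keeping A's fallback when no pair qualifies.
import Mathlib
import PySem

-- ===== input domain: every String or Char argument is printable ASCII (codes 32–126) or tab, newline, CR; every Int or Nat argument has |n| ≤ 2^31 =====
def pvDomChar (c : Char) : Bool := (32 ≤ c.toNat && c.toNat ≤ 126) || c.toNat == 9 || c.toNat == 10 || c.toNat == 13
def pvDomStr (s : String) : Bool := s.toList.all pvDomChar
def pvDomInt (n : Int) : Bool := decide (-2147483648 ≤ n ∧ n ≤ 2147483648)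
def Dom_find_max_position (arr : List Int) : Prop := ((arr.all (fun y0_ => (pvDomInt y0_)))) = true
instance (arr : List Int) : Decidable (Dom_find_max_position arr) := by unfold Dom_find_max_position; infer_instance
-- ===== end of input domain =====

-- B replaces A's forward fold (last-hit index + found flag) with a stateless backward
-- scan that returns the first qualifying index from the end; objective: alternative.

-- ===== PORT A =====
-- forward loop over range(1, len(arr)), state (max_index, bolo)
def find_max_position (arr : List Int) : Option Int :=
  if arr = [] then none
  else
    let st :=
      (PySem.List.pyRange 1 (arr.length : Int) 1).foldl
        (fun (s : Int × Bool) i =>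
          if PySem.List.pyGetD arr i 0 > PySem.List.pyGetD arr (i - 1) 0 then (i, true) else s)
        (0, false)
    if st.2 = false ∧ PySem.List.pyGetD arr st.1 0 = 0 then none
    else some st.1

-- ===== PORT B =====
-- backward scan: checks index j = i+1 down to 1, returns the first hit from the end
def pvScanDown (arr : List Int) : Nat → Option Int
  | 0 => none
  | (i+1) =>
      if PySem.List.pyGetD arr ((i : Int) + 1) 0 > PySem.List.pyGetD arr (i : Int) 0
      then some ((i : Int) + 1)
      else pvScanDown arr i

def find_max_position_alt (arr : List Int) : Option Int :=
  if arr = [] then none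
  else
    match pvScanDown arr (arr.length - 1) with
    | some i => some i
    | none => if PySem.List.pyGetD arr 0 0 = 0 then none else some 0

-- ===== PRECONDITION & SPEC =====
def Spec_find_max_position (arr : List Int) (out : Option Int) : Prop := out = find_max_position_alt arr
instance (arr : List Int) (out : Option Int) : Decidable (Spec_find_max_position arr out) := by unfold Spec_find_max_position; infer_instance

-- ===== CLAIM (what is proved, stated in full; the proofs are below) =====
def Claim_equal_find_max_position : Prop := ∀ (arr : List Int), Dom_find_max_position arr → Spec_find_max_position arr (find_max_position arr)

-- ===== LEMMAS AND PROOFS =====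

-- A's fold over indices 1..k computes exactly B's backward scan down from k.
theorem pvFold_eq_scan (arr : List Int) (k : Nat) :
    (PySem.List.pyRange 1 ((k : Int) + 1) 1).foldl
        (fun (s : Int × Bool) i =>
          if PySem.List.pyGetD arr i 0 > PySem.List.pyGetD arr (i - 1) 0 then (i, true) else s)
        (0, false)
      = (match pvScanDown arr k with
         | some i => (i, true)
         | none => ((0 : Int), false)) := by
  induction k with
  | zero =>
      rw [PySem.List.pyRange_one_eq_nil (by norm_num)]
      simp [pvScanDown]
  | succ n ih =>
      have h1 : (1 : Int) ≤ (n : Int) + 1 := by omega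
      have : ((n + 1 : Nat) : Int) + 1 = ((n : Int) + 1) + 1 := by push_cast; ring
      rw [this, PySem.List.pyRange_one_succ_right h1, List.foldl_append]
      simp only [List.foldl_cons, List.foldl_nil, ih, pvScanDown]
      simp only [add_sub_cancel_right]
      split <;> simp

theorem pvMain (arr : List Int) :
    find_max_position arr = find_max_position_alt arr := by
  unfold find_max_position find_max_position_alt
  by_cases hnil : arr = []
  · simp [hnil]
  · simp only [hnil, if_false]
    obtain ⟨m, hm⟩ : ∃ m, arr.length = m + 1 := by
      cases arr with
      | nil => exact absurd rfl hnil
      | cons a t => exact ⟨t.length, rfl⟩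
    have hcast : (arr.length : Int) = (m : Int) + 1 := by rw [hm]; push_cast; ring
    rw [hcast, pvFold_eq_scan arr m, hm]
    simp only [Nat.add_sub_cancel]
    cases h : pvScanDown arr m with
    | none => simp
    | some i => simp

-- ===== VERDICT (by name: the statement is the Claim_ definition above) =====
theorem find_max_position_spec : Claim_equal_find_max_position := by
  intro arr _
  unfold Spec_find_max_position
  exact pvMain arr
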